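-- pv_equiv track=rewrite | github.com/tskz-sys/mediapipewith3cams-code | postprocess_3d_pose_pipeline.py | _resolve_requested_columns
-- ===== SOURCE A (Python) =====
-- from typing import Dict, List, Optional, Tuple
--
-- def _build_lower_map(columns: List[str]) -> Dict[str, str]:
--     lower_map: Dict[str, str] = {}
--     for col in columns:
--         key = col.lower()
--         if key not in lower_map:
--             lower_map[key] = col
--     return lower_map
--
-- def _resolve_requested_columns(columns: List[str], requested: List[str], label: str) -> List[str]:
--     lower_map = _build_lower_map(columns)
--     resolved = []
--     missing = []
--     for name in requested:
--         key = name.lower().strip()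
--         col = lower_map.get(key)
--         if col is None:
--             missing.append(name)
--         else:
--             resolved.append(col)
--     if missing:
--         raise ValueError(f"{label} columns missing: {', '.join(missing)}")
--     return resolved
-- ===== SOURCE B (Python) =====
-- def _resolve_requested_columns(columns, requested, label):
--     # Inverted traversal: scan columns once (outer), filling a slot per requested
--     # name; a filled slot is never overwritten, so the first matching column wins.
--     keys = [name.lower().strip() for name in requested]
--     res = [None] * len(requested)
--     for col in columns:
--         low = col.lower()
--         for j, key in enumerate(keys):
--             if res[j] is None and key == low:
--                 res[j] = col
--     missing = [name for name, r in zip(requested, res) if r is None]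
--     if missing:
--         raise ValueError(f"{label} columns missing: {', '.join(missing)}")
--     return res
-- ===== Notes on version B (the rewrite author's own statement) =====
-- stated objective: alternative
-- what changed: Inverts the traversal: instead of A's precomputed lowercase dict then a pass over requested, B scans the columns once in the outer loop and fills a slot table indexed by the requested names (a filled slot is never overwritten, preserving first-match), then reads missing/resolved off the slots.
import Mathlib
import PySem

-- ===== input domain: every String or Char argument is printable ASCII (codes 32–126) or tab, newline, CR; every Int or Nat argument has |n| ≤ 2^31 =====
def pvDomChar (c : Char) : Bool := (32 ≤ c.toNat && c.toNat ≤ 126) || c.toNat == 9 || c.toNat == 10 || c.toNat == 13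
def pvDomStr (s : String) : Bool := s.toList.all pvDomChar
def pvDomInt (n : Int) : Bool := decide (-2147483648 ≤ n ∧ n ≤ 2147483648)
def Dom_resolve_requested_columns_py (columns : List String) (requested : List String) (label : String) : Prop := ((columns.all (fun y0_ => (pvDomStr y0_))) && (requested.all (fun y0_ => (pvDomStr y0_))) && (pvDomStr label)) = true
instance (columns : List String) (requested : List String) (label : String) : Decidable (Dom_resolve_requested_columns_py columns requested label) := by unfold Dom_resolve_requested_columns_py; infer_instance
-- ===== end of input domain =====

-- B inverts the traversal: instead of A's lowercase dict + pass over requested, B scans the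
-- columns once (outer loop) filling a never-overwritten slot per requested name (objective:
-- alternative). Equal return value on all inputs where A returns (Pre_ excludes the inputs
-- where both raise ValueError).


-- ===== PORT A =====
-- helper _build_lower_map: first-wins lowercase dict
def buildLowerMapA (columns : List String) : PySem.Dict String String :=
  columns.foldl
    (fun lower_map col =>
      let key := PySem.Str.lower col
      if (lower_map.get? key).isNone then lower_map.insert key col else lower_map)
    PySem.Dict.empty

def resolve_requested_columns_py (columns : List String) (requested : List String) (label : String) : List String :=
  let lower_map := buildLowerMapA columns
  let rm :=
    requested.foldl
      (fun (acc : List String × List String) name =>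
        let key := PySem.Str.strip (PySem.Str.lower name)
        match lower_map.get? key with
        | none => (acc.1, acc.2 ++ [name])
        | some col => (acc.1 ++ [col], acc.2))
      ([], [])
  -- 'if missing: raise ValueError(...)': the raising inputs are excluded by Pre_
  rm.1

-- ===== PORT B =====
-- 'keys = [name.lower().strip() for name in requested]' is hoisted out of the loop;
-- inner 'for j, key in enumerate(keys): if res[j] is None and key == low: res[j] = col'
-- (elementwise update of res, which runs parallel to keys, = zipWith over the pair)
def stepB (keys : List String) (res : List (Option String)) (col : String) : List (Option String) :=
  let low := PySem.Str.lower col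
  List.zipWith (fun r key => if r = none ∧ key = low then some col else r) res keys

def resolve_requested_columns_py_alt (columns : List String) (requested : List String) (label : String) : List String :=
  let keys := requested.map (fun name => PySem.Str.strip (PySem.Str.lower name))
  let res := columns.foldl (stepB keys) (List.replicate requested.length none)
  -- 'missing = [name for name, r in zip(requested, res) if r is None]'
  -- 'if missing: raise ValueError(...)': the raising inputs are excluded by Pre_;
  -- 'return res' (all slots filled there) is ported as filterMap id, exact whenever B returns
  res.filterMap id

-- ===== PRECONDITION & SPEC =====
-- Pre_ excludes exactly the inputs on which the Python A (and B) raises ValueError: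
-- some requested name with no case-insensitive match among the columns.
def Pre_resolve_requested_columns_py (columns : List String) (requested : List String) (label : String) : Prop :=
  ∀ name ∈ requested, ∃ col ∈ columns, PySem.Str.lower col = PySem.Str.strip (PySem.Str.lower name)
instance (columns : List String) (requested : List String) (label : String) : Decidable (Pre_resolve_requested_columns_py columns requested label) := by unfold Pre_resolve_requested_columns_py; infer_instance
def pvWitness_resolve_requested_columns_py : List String × List String × String := (["Frame", "frame", "X"], [" frame ", "x"], "pose")

def Spec_resolve_requested_columns_py (columns : List String) (requested : List String) (label : String) (out : List String) : Prop := out = resolve_requested_columns_py_alt columns requested label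
instance (columns : List String) (requested : List String) (label : String) (out : List String) : Decidable (Spec_resolve_requested_columns_py columns requested label out) := by unfold Spec_resolve_requested_columns_py; infer_instance

-- ===== CLAIM (what is proved, stated in full; the proofs are below) =====
def Claim_equal_resolve_requested_columns_py : Prop := ∀ (columns : List String) (requested : List String) (label : String), Dom_resolve_requested_columns_py columns requested label → Pre_resolve_requested_columns_py columns requested label → Spec_resolve_requested_columns_py columns requested label (resolve_requested_columns_py columns requested label)

-- ===== LEMMAS AND PROOFS =====
-- first case-insensitive match in a column list (proof-side characterisation of both ports)
def firstMatch (columns : List String) (key : String) : Option String :=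
  match columns with
  | [] => none
  | col :: rest => if PySem.Str.lower col = key then some col else firstMatch rest key

-- A's first-wins dict lookup = first match scan
theorem get?_buildLowerMapA_aux (cols : List String) (d : PySem.Dict String String) (k : String) :
    (cols.foldl
      (fun lower_map col =>
        let key := PySem.Str.lower col
        if (lower_map.get? key).isNone then lower_map.insert key col else lower_map)
      d).get? k =
    match d.get? k with
    | some v => some v
    | none => firstMatch cols k := by
  induction cols generalizing d with
  | nil => cases h : d.get? k <;> simp [firstMatch, h]
  | cons c rest ih =>
    simp only [List.foldl_cons]
    by_cases hc : (d.get? (PySem.Str.lower c)).isNone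
    · simp only [hc, if_pos, ih]
      by_cases hk : k = PySem.Str.lower c
      · subst hk
        rw [PySem.Dict.get?_insert_self]
        simp only [Option.isNone_iff_eq_none] at hc
        simp [hc, firstMatch]
      · rw [PySem.Dict.get?_insert_of_ne _ _ hk]
        cases hdk : d.get? k with
        | some v => simp
        | none =>
          simp only [firstMatch]
          rw [if_neg (fun h => hk h.symm)]
    · simp only [hc, if_neg, Bool.false_eq_true, not_false_iff, ih]
      cases hdk : d.get? k with
      | some v => simp
      | none =>
        simp only [firstMatch]
        by_cases hk : PySem.Str.lower c = k
        · exfalso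
          rw [hk] at hc
          simp [hdk] at hc
        · rw [if_neg hk]

theorem get?_buildLowerMapA (cols : List String) (k : String) :
    (buildLowerMapA cols).get? k = firstMatch cols k := by
  have h := get?_buildLowerMapA_aux cols PySem.Dict.empty k
  simpa [buildLowerMapA] using h

-- A's resolved list = filterMap of the first-match function over requested
theorem resolveA_foldl (columns : List String) (requested : List String)
    (acc : List String × List String) :
    (requested.foldl
      (fun (acc : List String × List String) name =>
        let key := PySem.Str.strip (PySem.Str.lower name)
        match (buildLowerMapA columns).get? key with
        | none => (acc.1, acc.2 ++ [name])
        | some col => (acc.1 ++ [col], acc.2)) acc).1 =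
    acc.1 ++ requested.filterMap (fun name => firstMatch columns (PySem.Str.strip (PySem.Str.lower name))) := by
  induction requested generalizing acc with
  | nil => simp
  | cons n rest ih =>
    rw [List.foldl_cons, ih]
    cases h : (buildLowerMapA columns).get? (PySem.Str.strip (PySem.Str.lower n)) with
    | none => simp [List.filterMap_cons, ← get?_buildLowerMapA, h]
    | some col => simp [List.filterMap_cons, ← get?_buildLowerMapA, h]

-- zipWith of an elementwise function against (l.map g, l) is a map
theorem zipWith_map_self {α β : Type} (h : β → α → β) (g : α → β) (l : List α) :
    List.zipWith h (l.map g) l = l.map (fun x => h (g x) x) := by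
  induction l with
  | nil => rfl
  | cons x xs ih => simp [ih]

-- B's slot fold, generalized over the initial slot contents (given pointwise by g)
theorem foldB_map (keys : List String) (cols : List String) (g : String → Option String) :
    cols.foldl (stepB keys) (keys.map g) =
    keys.map (fun k =>
      match g k with
      | some v => some v
      | none => firstMatch cols k) := by
  induction cols generalizing g with
  | nil =>
    simp only [List.foldl_nil]
    congr 1
    funext k
    cases h : g k <;> simp [h, firstMatch]
  | cons c rest ih =>
    simp only [List.foldl_cons]
    rw [show stepB keys (keys.map g) c =
        keys.map (fun k =>
          if g k = none ∧ k = PySem.Str.lower c then some c else g k) from by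
      simp only [stepB]
      exact zipWith_map_self _ g keys]
    rw [ih]
    congr 1
    funext k
    cases h : g k with
    | some v => simp [h]
    | none =>
      simp only [h, true_and]
      by_cases hk : k = PySem.Str.lower c
      · simp [hk, firstMatch]
      · rw [if_neg hk]
        simp only [firstMatch]
        rw [if_neg (fun h' => hk h'.symm)]

theorem foldB_spec (requested : List String) (cols : List String) :
    cols.foldl (stepB (requested.map (fun n => PySem.Str.strip (PySem.Str.lower n))))
        (List.replicate requested.length none) =
    requested.map (fun n => firstMatch cols (PySem.Str.strip (PySem.Str.lower n))) := by
  have h0 : (List.replicate requested.length (none : Option String)) =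
      (requested.map (fun n => PySem.Str.strip (PySem.Str.lower n))).map (fun _ => none) := by
    induction requested with
    | nil => rfl
    | cons x xs ih => simpa [List.replicate_succ] using ih
  rw [h0, foldB_map, List.map_map]
  rfl

-- ===== VERDICT (by name: the statement is the Claim_ definition above) =====
theorem resolve_requested_columns_py_spec : Claim_equal_resolve_requested_columns_py := by
  intro columns requested label _ _
  unfold Spec_resolve_requested_columns_py resolve_requested_columns_py resolve_requested_columns_py_alt
  simp only [resolveA_foldl, foldB_spec, List.nil_append, List.filterMap_map]
  rfl
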